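-- pv_equiv track=rewrite | github.com/grid-parity-exchange/Prescient | prescient/gosm/markov_chains/markov_chains.py | mapping_from_walk
-- ===== SOURCE A (Python) =====
-- def increment(mapping, state, next_state, count=1):
--     """
--     Increments mapping[state][next_state], creating entries
--     if need be
--
--     Specify count you want to increment by something other
--     than 1.
--
--     Args:
--         mapping (dict[State,dict[State,int]]): The transition counts
--         state (State): The state of first state
--         next_state (State): The state to transition to
--         count (int): The amount to increment by
--     """
--     if state in mapping:
--         if next_state in mapping[state]:
--             mapping[state][next_state] += count
--         else:
--             mapping[state][next_state] = count
--     else: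
--         mapping[state] = {next_state:count}
--
-- def mapping_from_walk(walk, memory=1):
--     """
--     From a sequence of states, generates the count map from which one
--     state transitions to another. This is stored as a dictionary of the form
--     {State -> {State -> count}}.
--
--     The memory argument means to consider the frequency n states transition
--     to the next n states. For example, if we have states [A, B, A, A] and
--     set memory = 2,
--     our mapping would be {(A, B): {(B, A): 1}, (B, A): {(A, A): 1}}
--
--     If memory > 1, the keys in the dictionary will be tuples of states
--
--     Args:
--         walk (List[State]): A sequence of states
--         memory (int): A number representing how many states to use for memory
--     """
--
--     count_map = {}
--
--
--     if memory == 1: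
--         for (state, next_state) in zip(walk, walk[1:]):
--             increment(count_map, state, next_state)
--     else:
--         offsets = [walk[i:] for i in range(memory)]
--         state_tuples = list(zip(*offsets))
--         for (state, next_state) in zip(state_tuples, state_tuples[1:]):
--             increment(count_map, state, next_state)
--
--     return count_map
-- ===== SOURCE B (Python) =====
-- def mapping_from_walk(walk, memory=1):
--     # Phase 1: the unit sequence (states, or state-tuples when memory != 1).
--     if memory == 1:
--         items = list(walk)
--     else:
--         items = list(zip(*[walk[i:] for i in range(memory)]))
--     # Phase 2: flat count of consecutive transitions (first-occurrence order).
--     cnt = {}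
--     for p in zip(items, items[1:]):
--         cnt[p] = cnt.get(p, 0) + 1
--     # Phase 3: regroup the flat table by source state via comprehensions.
--     sources = list(dict.fromkeys(s for s, _ in cnt))
--     return {s: {t: c for (s2, t), c in cnt.items() if s2 == s} for s in sources}
-- ===== Notes on version B (the rewrite author's own statement) =====
-- stated objective: alternative
-- what changed: A builds the nested dict in one pass with create-or-increment mutation of inner dicts; B first counts all consecutive transitions into one flat pair->count table and then regroups that table by source state with dict comprehensions (no mutation of nested dicts).
-- outside the precondition, e.g. on mapping_from_walk([1, 2, 3], 2): A returns {(1, 2): {(2, 3): 1}}, B returns {(1, 2): {(2, 3): 1}}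
import Mathlib
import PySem

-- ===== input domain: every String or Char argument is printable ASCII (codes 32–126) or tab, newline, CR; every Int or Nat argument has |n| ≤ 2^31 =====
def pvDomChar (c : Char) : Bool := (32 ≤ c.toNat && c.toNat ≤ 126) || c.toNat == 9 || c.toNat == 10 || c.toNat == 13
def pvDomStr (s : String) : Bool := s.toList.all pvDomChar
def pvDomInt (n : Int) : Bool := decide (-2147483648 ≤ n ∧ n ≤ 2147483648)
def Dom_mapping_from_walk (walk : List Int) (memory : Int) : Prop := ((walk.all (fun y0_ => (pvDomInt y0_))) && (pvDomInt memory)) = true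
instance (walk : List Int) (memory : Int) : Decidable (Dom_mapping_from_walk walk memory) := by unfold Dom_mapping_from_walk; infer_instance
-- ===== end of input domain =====

-- B replaces A's single-pass create-or-increment mutation of nested dicts by a flat
-- transition->count table that is regrouped by source state in a second pass; objective: alternative.
-- A mutates no argument; the nested Python dict {int: {int: int}} is returned as its items
-- (assoc list in insertion order) per the type convention.

-- ===== PORT A =====
-- helper 'increment' of A (mapping_from_walk always calls it with count = 1; kept as a parameter)
def pyIncrement (mapping : PySem.Dict Int (PySem.Dict Int Int)) (state next_state count : Int) :
    PySem.Dict Int (PySem.Dict Int Int) :=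
  match mapping.get? state with                          -- 'if state in mapping' / 'mapping[state]'
  | some inner =>
      if inner.contains next_state then                  -- 'if next_state in mapping[state]'
        mapping.insert state (inner.insert next_state (inner.getD next_state 0 + count))
      else
        mapping.insert state (inner.insert next_state count)
  | none => mapping.insert state (PySem.Dict.mk [(next_state, count)])  -- mapping[state] = {next_state: count}

-- Pre_ restricts to inputs where the memory ≠ 1 branch of A yields {} (otherwise A's keys are
-- tuples, not values of the declared Int-keyed type); that branch is therefore ported as [].
def mapping_from_walk (walk : List Int) (memory : Int) : List (Int × List (Int × Int)) :=
  if memory = 1 then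
    (((walk.zip (walk.drop 1)).foldl                      -- 'for (state, next_state) in zip(walk, walk[1:])'
        (fun count_map p => pyIncrement count_map p.1 p.2 1)
        PySem.Dict.empty).items.map (fun q => (q.1, q.2.items)))
  else []

-- ===== PORT B =====
def mapping_from_walk_alt (walk : List Int) (memory : Int) : List (Int × List (Int × Int)) :=
  if memory = 1 then
    -- phase 2: cnt[p] = cnt.get(p, 0) + 1 over zip(items, items[1:])
    let cnt : PySem.Dict (Int × Int) Int :=
      (walk.zip (walk.drop 1)).foldl (fun d p => d.insert p (d.getD p 0 + 1)) PySem.Dict.empty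
    -- phase 3: sources = dedup of the first components; regroup by filtering the flat table
    let sources : List Int := PySem.Set.ofList (cnt.items.map (fun pc => pc.1.1))
    sources.map (fun s =>
      (s, (cnt.items.filter (fun pc => pc.1.1 == s)).map (fun pc => (pc.1.2, pc.2))))
  else []  -- within Pre_ the tuple branch of Source B produces no transitions, i.e. {}

-- ===== PRECONDITION & SPEC =====
-- Pre_ excludes exactly the inputs (memory ≥ 2 with more than memory states) on which A's Python
-- return value is a TUPLE-keyed dict — not a value of the declared Lean return type
-- List (Int × List (Int × Int)); the Python B returns the very same tuple-keyed dict there.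
def Pre_mapping_from_walk (walk : List Int) (memory : Int) : Prop :=
  memory = 1 ∨ memory ≤ 0 ∨ (walk.length : Int) ≤ memory
instance (walk : List Int) (memory : Int) : Decidable (Pre_mapping_from_walk walk memory) := by
  unfold Pre_mapping_from_walk; infer_instance
def pvWitness_mapping_from_walk : List Int × Int := ([1, 2, 1, 1, 2], 1)

def Spec_mapping_from_walk (walk : List Int) (memory : Int) (out : List (Int × List (Int × Int))) : Prop := out = mapping_from_walk_alt walk memory
instance (walk : List Int) (memory : Int) (out : List (Int × List (Int × Int))) : Decidable (Spec_mapping_from_walk walk memory out) := by unfold Spec_mapping_from_walk; infer_instance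

-- ===== CLAIM (what is proved, stated in full; the proofs are below) =====
def Claim_equal_mapping_from_walk : Prop := ∀ (walk : List Int) (memory : Int), Dom_mapping_from_walk walk memory → Pre_mapping_from_walk walk memory → Spec_mapping_from_walk walk memory (mapping_from_walk walk memory)

-- ===== LEMMAS AND PROOFS =====

-- proof-only intermediate: one step of regrouping the flat table into the nested dict
def regroupStep (count_map : PySem.Dict Int (PySem.Dict Int Int)) (pc : (Int × Int) × Int) :
    PySem.Dict Int (PySem.Dict Int Int) :=
  match count_map.get? pc.1.1 with
  | some inner => count_map.insert pc.1.1 (inner.insert pc.1.2 pc.2)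
  | none => count_map.insert pc.1.1 (PySem.Dict.empty.insert pc.1.2 pc.2)

-- 'the nested map already has a count for transition (s, t)'
def NP (m : PySem.Dict Int (PySem.Dict Int Int)) (s t : Int) : Prop :=
  ∃ inner, m.get? s = some inner ∧ inner.contains t = true

theorem np_regroupStep (m : PySem.Dict Int (PySem.Dict Int Int)) (pc : (Int × Int) × Int)
    (s t : Int) : NP (regroupStep m pc) s t ↔ NP m s t ∨ (s = pc.1.1 ∧ t = pc.1.2) := by
  unfold regroupStep NP
  cases h : m.get? pc.1.1 with
  | none =>
    simp only [PySem.Dict.get?_insert]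
    by_cases hs : s = pc.1.1
    · subst hs
      simp [h, PySem.Dict.contains_insert, PySem.Dict.contains_empty]
    · simp [hs]
  | some inner =>
    simp only [PySem.Dict.get?_insert]
    by_cases hs : s = pc.1.1
    · subst hs
      simp only [if_true, true_and]
      constructor
      · rintro ⟨i, hi, hc⟩
        obtain rfl : i = inner.insert pc.1.2 pc.2 := by injection hi.symm
        rw [PySem.Dict.contains_insert] at hc
        rcases Bool.or_eq_true_iff.mp hc with h' | h'
        · exact Or.inr (beq_iff_eq.mp h')
        · exact Or.inl ⟨inner, h, h'⟩
      · rintro (⟨i, hi, hc⟩ | rfl)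
        · refine ⟨_, rfl, ?_⟩
          rw [h] at hi
          obtain rfl : i = inner := by injection hi.symm
          simp [PySem.Dict.contains_insert, hc]
        · exact ⟨_, rfl, by simp⟩
    · simp [hs]

theorem np_foldl_regroupStep (L : List ((Int × Int) × Int))
    (m : PySem.Dict Int (PySem.Dict Int Int)) (s t : Int) :
    NP (L.foldl regroupStep m) s t ↔ NP m s t ∨ (s, t) ∈ L.map (·.1) := by
  induction L generalizing m with
  | nil => simp
  | cons pc L ih =>
    simp only [List.foldl_cons, ih, np_regroupStep, List.map_cons, List.mem_cons]
    constructor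
    · rintro ((h | ⟨rfl, rfl⟩) | h)
      · exact Or.inl h
      · exact Or.inr (Or.inl rfl)
      · exact Or.inr (Or.inr h)
    · rintro (h | (h | h))
      · exact Or.inl (Or.inl h)
      · exact Or.inl (Or.inr ⟨by rw [← h], by rw [← h]⟩)
      · exact Or.inr h

theorem dict_insert_comm {ν : Type} (d : PySem.Dict Int ν) (k k' : Int) (v : ν) (v' : ν)
    (hk : d.contains k = true) (hne : k' ≠ k) :
    (d.insert k v).insert k' v' = (d.insert k' v').insert k v := by
  apply PySem.Dict.ext
  cases h' : d.contains k' with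
  | true =>
    have c1 : (d.insert k v).contains k' = true := by
      rw [PySem.Dict.contains_insert, h']; simp
    have c2 : (d.insert k' v').contains k = true := by
      rw [PySem.Dict.contains_insert, hk]; simp
    rw [PySem.Dict.items_insert_of_contains _ _ c1, PySem.Dict.items_insert_of_contains _ _ hk,
        PySem.Dict.items_insert_of_contains _ _ c2, PySem.Dict.items_insert_of_contains _ _ h']
    simp only [List.map_map]
    apply List.map_congr_left
    intro p _
    simp only [Function.comp_apply]
    by_cases h1 : p.1 = k
    · simp [h1, Ne.symm hne]
    · by_cases h2 : p.1 = k'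
      · simp [h2, hne]
      · simp [h1, h2]
  | false =>
    have c1 : (d.insert k v).contains k' = false := by
      rw [PySem.Dict.contains_insert, h']; simp [hne]
    have c2 : (d.insert k' v').contains k = true := by
      rw [PySem.Dict.contains_insert, hk]; simp
    rw [PySem.Dict.items_insert_of_not_contains _ _ c1, PySem.Dict.items_insert_of_contains _ _ hk,
        PySem.Dict.items_insert_of_contains _ _ c2, PySem.Dict.items_insert_of_not_contains _ _ h',
        List.map_append]
    simp [hne]

theorem inc_eq_regroupStep (m : PySem.Dict Int (PySem.Dict Int Int)) (s t c : Int)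
    (h : ¬ NP m s t) : pyIncrement m s t c = regroupStep m ((s, t), c) := by
  unfold pyIncrement regroupStep
  cases hg : m.get? s with
  | none => rfl
  | some inner =>
    have hct : inner.contains t = false := by
      by_contra hc
      exact h ⟨inner, hg, by simpa using Bool.of_not_eq_false hc⟩
    simp [hct]
theorem pyInc_some_true (m : PySem.Dict Int (PySem.Dict Int Int)) {s : Int} {inner} (t c : Int)
    (h : m.get? s = some inner) (hct : inner.contains t = true) :
    pyIncrement m s t c = m.insert s (inner.insert t (inner.getD t 0 + c)) := by
  unfold pyIncrement; rw [h]; simp [hct]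
theorem step_some (m : PySem.Dict Int (PySem.Dict Int Int)) {s : Int} {inner} (t c : Int)
    (h : m.get? s = some inner) :
    regroupStep m ((s, t), c) = m.insert s (inner.insert t c) := by
  unfold regroupStep; rw [h]
theorem step_none (m : PySem.Dict Int (PySem.Dict Int Int)) {s : Int} (t c : Int)
    (h : m.get? s = none) :
    regroupStep m ((s, t), c) = m.insert s (PySem.Dict.empty.insert t c) := by
  unfold regroupStep; rw [h]
theorem contains_of_get?_some {ν : Type} (d : PySem.Dict Int ν) (k : Int) (w : ν)
    (h : d.get? k = some w) : d.contains k = true := by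
  rw [PySem.Dict.contains_eq_isSome_get?, h]
  rfl

theorem regroupStep_bump (m : PySem.Dict Int (PySem.Dict Int Int)) (s t v : Int) :
    regroupStep m ((s, t), v + 1) = pyIncrement (regroupStep m ((s, t), v)) s t 1 := by
  cases hg : m.get? s with
  | none =>
    rw [step_none m t v hg, step_none m t (v + 1) hg,
        pyInc_some_true _ t 1 (PySem.Dict.get?_insert_self _ _ _)
          (PySem.Dict.contains_insert_self _ _ _),
        PySem.Dict.getD_insert_self, PySem.Dict.insert_insert_self,
        PySem.Dict.insert_insert_self]
  | some inner =>
    rw [step_some m t v hg, step_some m t (v + 1) hg,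
        pyInc_some_true _ t 1 (PySem.Dict.get?_insert_self _ _ _)
          (PySem.Dict.contains_insert_self _ _ _),
        PySem.Dict.getD_insert_self, PySem.Dict.insert_insert_self,
        PySem.Dict.insert_insert_self]

theorem regroupStep_pyIncrement_comm (m : PySem.Dict Int (PySem.Dict Int Int))
    (pc : (Int × Int) × Int) (s t : Int) (hne : pc.1 ≠ (s, t)) (hnp : NP m s t) :
    regroupStep (pyIncrement m s t 1) pc = pyIncrement (regroupStep m pc) s t 1 := by
  obtain ⟨inner, h, hct⟩ := hnp
  obtain ⟨⟨s', t'⟩, c⟩ := pc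
  rw [pyInc_some_true m t 1 h hct]
  by_cases hs : s' = s
  · subst hs
    have ht : t' ≠ t := fun he => hne (by rw [he])
    rw [step_some _ t' c (PySem.Dict.get?_insert_self _ _ _), step_some m t' c h,
        PySem.Dict.insert_insert_self,
        dict_insert_comm inner t t' _ c hct ht,
        pyInc_some_true _ t 1 (PySem.Dict.get?_insert_self _ _ _)
          (by rw [PySem.Dict.contains_insert, hct]; simp),
        PySem.Dict.insert_insert_self,
        PySem.Dict.getD_insert_of_ne _ _ _ (Ne.symm ht)]
  · have hcm : m.contains s = true := contains_of_get?_some m s inner h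
    cases hg' : m.get? s' with
    | none =>
      rw [step_none _ t' c (by rw [PySem.Dict.get?_insert_of_ne _ _ hs]; exact hg'),
          step_none m t' c hg',
          dict_insert_comm m s s' _ _ hcm hs,
          pyInc_some_true _ t 1 (by rw [PySem.Dict.get?_insert_of_ne _ _ (Ne.symm hs)]; exact h) hct]
    | some j =>
      rw [step_some _ t' c (by rw [PySem.Dict.get?_insert_of_ne _ _ hs]; exact hg'),
          step_some m t' c hg',
          dict_insert_comm m s s' _ _ hcm hs,
          pyInc_some_true _ t 1 (by rw [PySem.Dict.get?_insert_of_ne _ _ (Ne.symm hs)]; exact h) hct]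

theorem foldl_regroupStep_pyIncrement_comm (L : List ((Int × Int) × Int))
    (m : PySem.Dict Int (PySem.Dict Int Int)) (s t : Int)
    (hL : ∀ pc ∈ L, pc.1 ≠ (s, t)) (hnp : NP m s t) :
    L.foldl regroupStep (pyIncrement m s t 1) = pyIncrement (L.foldl regroupStep m) s t 1 := by
  induction L generalizing m with
  | nil => rfl
  | cons pc L ih =>
    simp only [List.foldl_cons]
    rw [regroupStep_pyIncrement_comm m pc s t (hL pc (by simp)) hnp]
    exact ih (regroupStep m pc) (fun q hq => hL q (by simp [hq]))
      ((np_regroupStep m pc s t).mpr (Or.inl hnp))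

theorem np_empty (s t : Int) : ¬ NP (PySem.Dict.empty : PySem.Dict Int (PySem.Dict Int Int)) s t := by
  rintro ⟨i, hi, -⟩
  rw [PySem.Dict.get?_empty] at hi
  cases hi

theorem main_fold_eq (Q : List (Int × Int)) :
    Q.foldl (fun m p => pyIncrement m p.1 p.2 1) PySem.Dict.empty
      = ((PySem.Set.ofList Q).map (fun k => (k, (Q.count k : Int)))).foldl regroupStep
          PySem.Dict.empty := by
  induction Q using List.reverseRecOn with
  | nil => rfl
  | append_singleton Q p ih =>
    obtain ⟨ps, pt⟩ := p
    rw [List.foldl_append, List.foldl_cons, List.foldl_nil, PySem.Set.ofList_append_singleton]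
    by_cases hp : (ps, pt) ∈ Q
    · -- p occurred before: its flat count is bumped in place
      rw [PySem.Set.add_of_mem ((PySem.Set.mem_ofList Q (ps, pt)).mpr hp)]
      obtain ⟨D1, D2, hsplit⟩ := List.append_of_mem ((PySem.Set.mem_ofList Q (ps, pt)).mpr hp)
      have hnd : (D1 ++ (ps, pt) :: D2).Nodup := hsplit ▸ PySem.Set.nodup_ofList Q
      have hpd : (ps, pt) ∉ D1 ∧ (ps, pt) ∉ D2 := by
        have h2 : ((ps, pt) :: (D1 ++ D2)).Nodup := List.nodup_middle.mp hnd
        have := (List.nodup_cons.mp h2).1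
        simp only [List.mem_append] at this
        exact ⟨fun h => this (Or.inl h), fun h => this (Or.inr h)⟩
      have hmap : (D1 ++ (ps, pt) :: D2).map (fun k => (k, ((Q ++ [(ps, pt)]).count k : Int)))
          = D1.map (fun k => (k, (Q.count k : Int)))
            ++ (((ps, pt), (Q.count (ps, pt) : Int) + 1)
                :: D2.map (fun k => (k, (Q.count k : Int)))) := by
        rw [List.map_append, List.map_cons]
        congr 1
        · apply List.map_congr_left
          intro k hk
          have hkp : k ≠ (ps, pt) := fun e => hpd.1 (e ▸ hk)
          simp [List.count_append, Ne.symm hkp]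
        · congr 1
          · simp [List.count_append]
          · apply List.map_congr_left
            intro k hk
            have hkp : k ≠ (ps, pt) := fun e => hpd.2 (e ▸ hk)
            simp [List.count_append, Ne.symm hkp]
      rw [hsplit, hmap, List.foldl_append, List.foldl_cons]
      have hnp1 : ¬ NP (List.foldl regroupStep PySem.Dict.empty
          (D1.map (fun k => (k, (Q.count k : Int))))) ps pt := by
        rw [np_foldl_regroupStep]
        rintro (h | hmem)
        · exact np_empty ps pt h
        · simp only [List.map_map] at hmem
          have : (ps, pt) ∈ D1 := by
            simpa using hmem
          exact hpd.1 this
      rw [regroupStep_bump _ ps pt _]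
      rw [foldl_regroupStep_pyIncrement_comm _ _ ps pt
        (by
          rintro ⟨k, cnt⟩ hk
          simp only [List.mem_map] at hk
          obtain ⟨k', hk', he⟩ := hk
          have hkk : k = k' := by
            have := congrArg Prod.fst he
            simpa using this.symm
          subst hkk
          exact fun e => hpd.2 (e ▸ hk')
          )
        ((np_regroupStep _ ((ps, pt), (Q.count (ps, pt) : Int)) ps pt).mpr
          (Or.inr ⟨rfl, rfl⟩))]
      congr 1
      rw [ih, hsplit, List.map_append, List.map_cons, List.foldl_append, List.foldl_cons]
    · -- first occurrence of p: a fresh pair is appended with count 1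
      rw [PySem.Set.add_of_not_mem (fun hm => hp ((PySem.Set.mem_ofList Q (ps, pt)).mp hm))]
      have hmap : ((PySem.Set.ofList Q) ++ [(ps, pt)]).map
            (fun k => (k, ((Q ++ [(ps, pt)]).count k : Int)))
          = (PySem.Set.ofList Q).map (fun k => (k, (Q.count k : Int))) ++ [((ps, pt), 1)] := by
        rw [List.map_append, List.map_cons, List.map_nil]
        congr 1
        · apply List.map_congr_left
          intro k hk
          have hkp : k ≠ (ps, pt) := fun e => hp (by
            have := (PySem.Set.mem_ofList Q k).mp hk
            exact e ▸ this)
          simp [List.count_append, Ne.symm hkp]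
        · have : Q.count (ps, pt) = 0 := List.count_eq_zero.mpr hp
          simp [List.count_append, this]
      rw [hmap, List.foldl_append, List.foldl_cons, List.foldl_nil]
      have hnp : ¬ NP (List.foldl regroupStep PySem.Dict.empty
          ((PySem.Set.ofList Q).map (fun k => (k, (Q.count k : Int))))) ps pt := by
        rw [np_foldl_regroupStep]
        rintro (h | hmem)
        · exact np_empty ps pt h
        · have : (ps, pt) ∈ Q := by
            have := (PySem.Set.mem_ofList Q (ps, pt)).mp (by simpa using hmem)
            exact this
          exact hp this
      rw [← inc_eq_regroupStep _ ps pt 1 hnp, ih]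

-- regrouping the flat table (keys distinct) and flattening = group-by-source of the flat table
theorem regroup_items (L : List ((Int × Int) × Int)) (hnd : (L.map Prod.fst).Nodup) :
    (L.foldl regroupStep PySem.Dict.empty).items.map (fun q => (q.1, q.2.items))
  = (PySem.Set.ofList (L.map (fun pc => pc.1.1))).map (fun s =>
      (s, (L.filter (fun pc => pc.1.1 == s)).map (fun pc => (pc.1.2, pc.2)))) := by
  induction L using List.reverseRecOn with
  | nil => rfl
  | append_singleton L pc0 ih =>
    obtain ⟨⟨ps, pt⟩, c⟩ := pc0
    rw [List.map_append, List.nodup_append] at hnd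
    obtain ⟨hndL, -, hdisj⟩ := hnd
    have hfresh : (ps, pt) ∉ L.map Prod.fst := fun hm => hdisj _ hm _ (by simp) rfl
    have ihL := ih hndL
    have hkeys : (L.foldl regroupStep PySem.Dict.empty).keys
        = PySem.Set.ofList (L.map (fun pc => pc.1.1)) := by
      have h1 : (L.foldl regroupStep PySem.Dict.empty).keys
          = ((L.foldl regroupStep PySem.Dict.empty).items.map
              (fun q => (q.1, q.2.items))).map Prod.fst := by
        simp only [PySem.Dict.keys, List.map_map]
        rfl
      rw [h1, ihL, List.map_map,
          show (Prod.fst ∘ fun s : Int =>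
              (s, (L.filter (fun pc => pc.1.1 == s)).map (fun pc => (pc.1.2, pc.2)))) = id
            from rfl, List.map_id]
    rw [List.foldl_append, List.foldl_cons, List.foldl_nil, List.map_append,
        List.map_cons, List.map_nil, PySem.Set.ofList_append_singleton]
    by_cases hmem : ps ∈ PySem.Set.ofList (L.map (fun pc => pc.1.1))
    · -- source ps already present: its inner dict gains (pt, c) at the end
      rw [PySem.Set.add_of_mem hmem]
      have hcont : (L.foldl regroupStep PySem.Dict.empty).contains ps = true :=
        (PySem.Dict.contains_iff_mem_keys _ _).mpr (hkeys ▸ hmem)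
      obtain ⟨inner, hg⟩ : ∃ inner, (L.foldl regroupStep PySem.Dict.empty).get? ps = some inner := by
        cases hg : (L.foldl regroupStep PySem.Dict.empty).get? ps with
        | none =>
          rw [PySem.Dict.contains_eq_isSome_get?, hg] at hcont
          cases hcont
        | some inner => exact ⟨inner, rfl⟩
      have himg : (ps, inner.items)
          ∈ (L.foldl regroupStep PySem.Dict.empty).items.map (fun q => (q.1, q.2.items)) :=
        List.mem_map.mpr ⟨(ps, inner), PySem.Dict.mem_items_of_get?_eq_some _ hg, rfl⟩
      rw [ihL] at himg
      obtain ⟨s, hs, he⟩ := List.mem_map.mp himg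
      rw [Prod.mk.injEq] at he
      obtain ⟨he1, he2⟩ := he
      have he1' : ps = s := he1.symm
      subst he1'
      have hinner : inner.items
          = (L.filter (fun pc => pc.1.1 == ps)).map (fun pc => (pc.1.2, pc.2)) := he2.symm
      have hptni : inner.contains pt = false := by
        cases hc : inner.contains pt with
        | false => rfl
        | true =>
          exfalso
          have hptk : pt ∈ inner.items.map Prod.fst := by
            have := (PySem.Dict.contains_iff_mem_keys _ _).mp hc
            simpa [PySem.Dict.keys] using this
          rw [hinner, List.map_map] at hptk
          obtain ⟨pc, hpcL, hpc2⟩ := List.mem_map.mp hptk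
          have hpc1 : pc.1.1 = ps := by
            have := (List.mem_filter.mp hpcL).2
            exact beq_iff_eq.mp this
          exact hfresh (List.mem_map.mpr ⟨pc, List.mem_filter.mp hpcL |>.1,
            by simp at hpc2; exact Prod.ext hpc1 hpc2⟩)
      rw [step_some _ pt c hg, PySem.Dict.items_insert_of_contains _ _ hcont, List.map_map]
      have hswap : (L.foldl regroupStep PySem.Dict.empty).items.map
            ((fun q : Int × PySem.Dict Int Int => (q.1, q.2.items))
              ∘ (fun p => if p.1 == ps then (ps, inner.insert pt c) else p))
          = ((L.foldl regroupStep PySem.Dict.empty).items.map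
              (fun q => (q.1, q.2.items))).map
              (fun q => if q.1 == ps then (ps, (inner.insert pt c).items) else q) := by
        rw [List.map_map]
        apply List.map_congr_left
        intro p _
        by_cases hp : p.1 = ps
        · simp [Function.comp, hp]
        · simp [Function.comp, hp]
      rw [hswap, ihL, List.map_map]
      apply List.map_congr_left
      intro s hsS
      simp only [Function.comp_apply, List.filter_append]
      by_cases hsp : s = ps
      · subst hsp
        simp only [beq_self_eq_true, if_true]
        rw [PySem.Dict.items_insert_of_not_contains _ _ hptni, hinner]
        simp
      · have : (ps == s) = false := by simp [Ne.symm hsp]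
        simp [hsp, this]
    · -- fresh source ps: a new outer entry is appended at the end
      rw [PySem.Set.add_of_not_mem hmem]
      have hg : (L.foldl regroupStep PySem.Dict.empty).get? ps = none :=
        (PySem.Dict.get?_eq_none_iff_not_mem_keys _ _).mpr (hkeys ▸ hmem)
      have hcont : (L.foldl regroupStep PySem.Dict.empty).contains ps = false := by
        rw [PySem.Dict.contains_eq_isSome_get?, hg]
        rfl
      have hpsL : ps ∉ L.map (fun pc : (Int × Int) × Int => pc.1.1) := fun hm =>
        hmem ((PySem.Set.mem_ofList _ _).mpr hm)
      rw [step_none _ pt c hg, PySem.Dict.items_insert_of_not_contains _ _ hcont,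
          List.map_append, ihL, List.map_append]
      congr 1
      · apply List.map_congr_left
        intro s hsS
        have hsp : (ps == s) = false := by
          have : s ≠ ps := fun he => hmem (he ▸ hsS)
          simp [Ne.symm this]
        simp [List.filter_append, hsp]
      · have hfil : L.filter (fun pc => pc.1.1 == ps) = [] := by
          rw [List.filter_eq_nil_iff]
          intro pc hpc
          simp only [beq_iff_eq]
          exact fun he => hpsL (List.mem_map.mpr ⟨pc, hpc, he⟩)
        simp only [List.filter_append, hfil, List.nil_append, List.filter_cons,
          beq_self_eq_true, if_true, List.map_cons, List.map_nil]
        rfl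

-- ===== VERDICT (by name: the statement is the Claim_ definition above) =====
theorem mapping_from_walk_spec : Claim_equal_mapping_from_walk := by
  intro walk memory _ _
  unfold Spec_mapping_from_walk mapping_from_walk mapping_from_walk_alt
  by_cases hm : memory = 1
  · simp only [if_pos hm]
    rw [main_fold_eq, PySem.Dict.foldl_insert_getD_add_one_eq_counter, PySem.Dict.items_counter]
    rw [regroup_items _ (by
      simp only [List.map_map]
      rw [show (Prod.fst ∘ fun k : Int × Int =>
            (k, ((walk.zip (walk.drop 1)).count k : Int))) = id from rfl, List.map_id]
      exact PySem.Set.nodup_ofList _)]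
  · simp only [if_neg hm]
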